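-- pv_equiv track=rewrite | github.com/contechjohnson/MCB | scripts/import_google_sheets.py | infer_reached_stage
-- ===== SOURCE A (Python) =====
-- from typing import Dict, List, Optional, Tuple
--
-- def infer_reached_stage(row: Dict) -> str:
--     """
--     Infer the furthest stage reached based on available data.
--     This is a best guess based on what fields are populated.
--     """
--     # Check for purchase (highest stage)
--     if row.get('purchase_date') or row.get('has_purchase'):
--         return 'purchased'
--
--     # Check for meeting attended (check common column names)
--     attended_fields = ['meeting_held', 'attended', 'showed_up', 'attended_date']
--     if any(row.get(field) for field in attended_fields):
--         return 'attended'
--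
--     # Check for meeting booked
--     booked_fields = ['meeting_booked', 'booked', 'booking_date', 'appointment_date']
--     if any(row.get(field) for field in booked_fields):
--         return 'booked'
--
--     # Check for qualified (answered questions, engaged with bot)
--     qualified_fields = ['qualified', 'dm_qualified', 'q1', 'q2', 'symptoms']
--     if any(row.get(field) for field in qualified_fields):
--         return 'qualified'
--
--     # Default: just contacted
--     return 'contacted'
-- ===== SOURCE B (Python) =====
-- _RANK = {
--     'purchase_date': 4, 'has_purchase': 4,
--     'meeting_held': 3, 'attended': 3, 'showed_up': 3, 'attended_date': 3,
--     'meeting_booked': 2, 'booked': 2, 'booking_date': 2, 'appointment_date': 2,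
--     'qualified': 1, 'dm_qualified': 1, 'q1': 1, 'q2': 1, 'symptoms': 1,
-- }
-- _STAGES = ['contacted', 'qualified', 'booked', 'attended', 'purchased']
--
--
-- def infer_reached_stage(row) -> str:
--     """Single pass over the row's own items: map each truthy field to a stage
--     rank via a fixed table and keep the maximum; index the stage-name list."""
--     best = 0
--     for field, value in row.items():
--         if value:
--             best = max(best, _RANK.get(field, 0))
--     return _STAGES[best]
-- ===== Notes on version B (the rewrite author's own statement) =====
-- stated objective: alternative
-- what changed: Inverts the traversal: instead of probing 15 candidate field names against the row in four staged checks, B makes one pass over the row's own items, maps each truthy field to a numeric rank through a fixed table, keeps the maximum, and indexes a stage-name list.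
import Mathlib
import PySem

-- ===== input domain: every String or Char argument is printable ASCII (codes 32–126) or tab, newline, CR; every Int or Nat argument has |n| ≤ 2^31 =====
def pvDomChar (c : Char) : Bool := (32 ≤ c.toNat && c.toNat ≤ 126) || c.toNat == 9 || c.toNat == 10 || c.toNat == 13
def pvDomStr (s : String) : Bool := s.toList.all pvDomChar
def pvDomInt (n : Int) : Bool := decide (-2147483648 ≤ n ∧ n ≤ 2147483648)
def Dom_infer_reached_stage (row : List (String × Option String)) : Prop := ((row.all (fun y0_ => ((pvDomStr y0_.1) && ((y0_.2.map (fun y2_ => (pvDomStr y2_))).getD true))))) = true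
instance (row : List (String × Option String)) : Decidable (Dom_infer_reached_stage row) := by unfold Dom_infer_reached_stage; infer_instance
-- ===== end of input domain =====

-- B inverts the traversal: one pass over the row's own items taking the maximum rank via a fixed field->rank table, instead of A's four staged probes of 15 candidate field names (objective: alternative).


-- truthiness of a Python value of type Optional[str]: not None and not the empty string
def pvTv : Option String → Bool
  | some s => s != ""
  | none => false

-- ===== PORT A =====
-- row.get(f) truthy: first-match lookup in the association list (= the dict), then truthiness
def pvTruthyGet (row : List (String × Option String)) (f : String) : Bool :=
  match (PySem.Dict.mk row).get? f with
  | some v => pvTv v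
  | none => false

def infer_reached_stage (row : List (String × Option String)) : String :=
  if pvTruthyGet row "purchase_date" || pvTruthyGet row "has_purchase" then "purchased"
  else if (["meeting_held", "attended", "showed_up", "attended_date"]).any (fun f => pvTruthyGet row f) then "attended"
  else if (["meeting_booked", "booked", "booking_date", "appointment_date"]).any (fun f => pvTruthyGet row f) then "booked"
  else if (["qualified", "dm_qualified", "q1", "q2", "symptoms"]).any (fun f => pvTruthyGet row f) then "qualified"
  else "contacted"

-- ===== PORT B =====
def pvRankDict : PySem.Dict String Int := PySem.Dict.mk
  [("purchase_date", 4), ("has_purchase", 4),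
   ("meeting_held", 3), ("attended", 3), ("showed_up", 3), ("attended_date", 3),
   ("meeting_booked", 2), ("booked", 2), ("booking_date", 2), ("appointment_date", 2),
   ("qualified", 1), ("dm_qualified", 1), ("q1", 1), ("q2", 1), ("symptoms", 1)]

def pvStages : List String := ["contacted", "qualified", "booked", "attended", "purchased"]

def infer_reached_stage_alt (row : List (String × Option String)) : String :=
  let best := row.foldl (fun best kv => if pvTv kv.2 then max best (pvRankDict.getD kv.1 0) else best) 0
  -- _STAGES[best]: best is always in [0, 4], so the lookup never fails
  (PySem.List.pyGet? pvStages best).getD ""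

-- ===== PRECONDITION & SPEC =====
-- Pre_ excludes association lists with duplicate keys: a Python dict cannot contain them, so such lists
-- represent no dict input; on them A's port (first-match lookup) and B's port (scan of all entries) may differ
-- although both Pythons, fed the collapsed dict, agree.
def Pre_infer_reached_stage (row : List (String × Option String)) : Prop :=
  (row.map Prod.fst).Nodup
instance (row : List (String × Option String)) : Decidable (Pre_infer_reached_stage row) := by unfold Pre_infer_reached_stage; infer_instance

def pvWitness_infer_reached_stage : (List (String × Option String)) :=
  [("qualified", some "yes"), ("meeting_booked", none), ("note", some "hi")]

def Spec_infer_reached_stage (row : List (String × Option String)) (out : String) : Prop := out = infer_reached_stage_alt row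
instance (row : List (String × Option String)) (out : String) : Decidable (Spec_infer_reached_stage row out) := by unfold Spec_infer_reached_stage; infer_instance

-- ===== CLAIM (what is proved, stated in full; the proofs are below) =====
def Claim_equal_infer_reached_stage : Prop := ∀ (row : List (String × Option String)), Dom_infer_reached_stage row → Pre_infer_reached_stage row → Spec_infer_reached_stage row (infer_reached_stage row)

-- ===== LEMMAS AND PROOFS =====

-- proof-side notions: rank of a key; "some truthy entry of rank i"; the maximum rank among truthy entries
def pvRk (k : String) : Int := pvRankDict.getD k 0

def pvC (i : Int) (row : List (String × Option String)) : Bool :=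
  row.any (fun kv => pvTv kv.2 && (pvRk kv.1 == i))

def pvT : List (String × Option String) → Int
  | [] => 0
  | kv :: t => max (if pvTv kv.2 then pvRk kv.1 else 0) (pvT t)

theorem pvRank_keys_nodup : pvRankDict.keys.Nodup := by decide

theorem pvRk_cases (k : String) : pvRk k = 0 ∨ pvRk k = 1 ∨ pvRk k = 2 ∨ pvRk k = 3 ∨ pvRk k = 4 := by
  unfold pvRk
  cases h : pvRankDict.get? k with
  | none => left; exact PySem.Dict.getD_of_get?_eq_none pvRankDict 0 h
  | some v =>
    rw [PySem.Dict.getD_of_get?_eq_some pvRankDict 0 h]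
    have hm := PySem.Dict.mem_items_of_get?_eq_some pvRankDict h
    simp [pvRankDict] at hm
    rcases hm with ⟨_, hv⟩ | ⟨_, hv⟩ | ⟨_, hv⟩ | ⟨_, hv⟩ | ⟨_, hv⟩ | ⟨_, hv⟩ | ⟨_, hv⟩ | ⟨_, hv⟩ | ⟨_, hv⟩ | ⟨_, hv⟩ | ⟨_, hv⟩ | ⟨_, hv⟩ | ⟨_, hv⟩ | ⟨_, hv⟩ | ⟨_, hv⟩ <;> omega

theorem pvRk_eq_iff (k : String) (v : Int) (hv : v ≠ 0) : pvRk k = v ↔ pvRankDict.get? k = some v := by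
  unfold pvRk
  cases h : pvRankDict.get? k with
  | none => rw [PySem.Dict.getD_of_get?_eq_none pvRankDict 0 h]; simp [Ne.symm hv]
  | some w => rw [PySem.Dict.getD_of_get?_eq_some pvRankDict 0 h]; simp

theorem pt4' (k : String) : (pvRk k == 4) = (k == "purchase_date" || k == "has_purchase") := by
  rw [Bool.eq_iff_iff]
  simp only [beq_iff_eq, Bool.or_eq_true]
  rw [pvRk_eq_iff k 4 (by omega),
      PySem.Dict.get?_eq_some_iff_mem_items pvRankDict k 4 pvRank_keys_nodup]
  simp [pvRankDict]

theorem pt3' (k : String) : (pvRk k == 3) = (k == "meeting_held" || k == "attended" || k == "showed_up" || k == "attended_date") := by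
  rw [Bool.eq_iff_iff]
  simp only [beq_iff_eq, Bool.or_eq_true]
  rw [pvRk_eq_iff k 3 (by omega),
      PySem.Dict.get?_eq_some_iff_mem_items pvRankDict k 3 pvRank_keys_nodup]
  simp [pvRankDict, or_assoc]

theorem pt2' (k : String) : (pvRk k == 2) = (k == "meeting_booked" || k == "booked" || k == "booking_date" || k == "appointment_date") := by
  rw [Bool.eq_iff_iff]
  simp only [beq_iff_eq, Bool.or_eq_true]
  rw [pvRk_eq_iff k 2 (by omega),
      PySem.Dict.get?_eq_some_iff_mem_items pvRankDict k 2 pvRank_keys_nodup]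
  simp [pvRankDict, or_assoc]

theorem pt1' (k : String) : (pvRk k == 1) = (k == "qualified" || k == "dm_qualified" || k == "q1" || k == "q2" || k == "symptoms") := by
  rw [Bool.eq_iff_iff]
  simp only [beq_iff_eq, Bool.or_eq_true]
  rw [pvRk_eq_iff k 1 (by omega),
      PySem.Dict.get?_eq_some_iff_mem_items pvRankDict k 1 pvRank_keys_nodup]
  simp [pvRankDict, or_assoc]

theorem pvT_nonneg (row : List (String × Option String)) : 0 ≤ pvT row := by
  induction row with
  | nil => simp [pvT]
  | cons kv t ih => simp only [pvT, le_max_iff]; right; exact ih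

theorem foldB (row : List (String × Option String)) (b : Int) (hb : 0 ≤ b) :
    row.foldl (fun best kv => if pvTv kv.2 then max best (pvRankDict.getD kv.1 0) else best) b
      = max b (pvT row) := by
  induction row generalizing b with
  | nil => simp only [List.foldl_nil, pvT]; exact (max_eq_left hb).symm
  | cons kv t ih =>
    simp only [List.foldl_cons, pvT]
    cases h : pvTv kv.2
    · simp only [Bool.false_eq_true, if_false]
      rw [ih b hb]
      rw [max_eq_right (pvT_nonneg t)]
    · simp only [if_true]
      rw [ih _ (le_trans hb (le_max_left b _))]
      rw [show pvRankDict.getD kv.1 0 = pvRk kv.1 from rfl, max_assoc]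

theorem pvT_chain (row : List (String × Option String)) :
    pvT row = if pvC 4 row then 4 else if pvC 3 row then 3 else if pvC 2 row then 2
              else if pvC 1 row then 1 else 0 := by
  induction row with
  | nil => simp [pvT, pvC]
  | cons kv t ih =>
    have hc : ∀ i, pvC i (kv :: t) = ((pvTv kv.2 && (pvRk kv.1 == i)) || pvC i t) := by
      intro i; simp [pvC]
    simp only [pvT, hc, ih]
    by_cases h : pvTv kv.2 = true
    · rcases pvRk_cases kv.1 with hr | hr | hr | hr | hr <;> simp only [h, hr] <;>
        simp <;> split_ifs <;> omega
    · rw [Bool.not_eq_true] at h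
      simp [h]
      split_ifs <;> omega

theorem any_key_false (t : List (String × Option String)) (f : String)
    (hf : f ∉ t.map Prod.fst) :
    t.any (fun kv => kv.1 == f && pvTv kv.2) = false := by
  induction t with
  | nil => rfl
  | cons kv t ih =>
    simp only [List.map_cons, List.mem_cons, not_or] at hf
    simp only [List.any_cons, ih hf.2, Bool.or_false]
    have : (kv.1 == f) = false := by simp; exact fun h => hf.1 h.symm
    simp [this]

theorem truthyGet_any (row : List (String × Option String)) (f : String)
    (h : (row.map Prod.fst).Nodup) :
    pvTruthyGet row f = row.any (fun kv => kv.1 == f && pvTv kv.2) := by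
  induction row with
  | nil => rfl
  | cons kv t ih =>
    simp only [List.map_cons, List.nodup_cons] at h
    unfold pvTruthyGet
    rw [PySem.Dict.get?_mk_cons]
    by_cases hk : kv.1 == f
    · have hf : f ∉ t.map Prod.fst := by
        have : kv.1 = f := by simpa using hk
        rw [← this]; exact h.1
      simp only [hk, if_true, List.any_cons, any_key_false t f hf, Bool.or_false, Bool.true_and]
    · have hk' : (kv.1 == f) = false := by simpa using hk
      have hih := ih h.2
      unfold pvTruthyGet at hih
      simp only [hk', Bool.false_eq_true, if_false, List.any_cons, Bool.false_and, Bool.false_or]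
      exact hih

-- pointwise bridges: "truthy entry of rank i" vs the explicit field names
theorem pt4 (k : String) (o : Option String) :
    (pvTv o && (pvRk k == 4)) = ((k == "purchase_date") && pvTv o || (k == "has_purchase") && pvTv o) := by
  cases h : pvTv o <;> simp [pt4']

theorem pt3 (k : String) (o : Option String) :
    (pvTv o && (pvRk k == 3)) = ((k == "meeting_held") && pvTv o || (k == "attended") && pvTv o
      || (k == "showed_up") && pvTv o || (k == "attended_date") && pvTv o) := by
  cases h : pvTv o <;> simp [pt3']

theorem pt2 (k : String) (o : Option String) :
    (pvTv o && (pvRk k == 2)) = ((k == "meeting_booked") && pvTv o || (k == "booked") && pvTv o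
      || (k == "booking_date") && pvTv o || (k == "appointment_date") && pvTv o) := by
  cases h : pvTv o <;> simp [pt2']

theorem pt1 (k : String) (o : Option String) :
    (pvTv o && (pvRk k == 1)) = ((k == "qualified") && pvTv o || (k == "dm_qualified") && pvTv o
      || (k == "q1") && pvTv o || (k == "q2") && pvTv o || (k == "symptoms") && pvTv o) := by
  cases h : pvTv o <;> simp [pt1']

theorem any_or (l : List (String × Option String)) (p q : String × Option String → Bool) :
    l.any (fun kv => p kv || q kv) = (l.any p || l.any q) := by
  induction l with
  | nil => rfl
  | cons kv t ih =>
    simp only [List.any_cons, ih]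
    cases p kv <;> cases q kv <;> simp

-- ===== VERDICT (by name: the statement is the Claim_ definition above) =====
theorem infer_reached_stage_spec : Claim_equal_infer_reached_stage := by
  intro row _ hpre
  unfold Spec_infer_reached_stage infer_reached_stage infer_reached_stage_alt
  have hB : row.foldl (fun best kv => if pvTv kv.2 then max best (pvRankDict.getD kv.1 0) else best) 0
      = pvT row := by
    rw [foldB row 0 le_rfl]
    exact max_eq_right (pvT_nonneg row)
  rw [hB, pvT_chain]
  have h4 : (pvTruthyGet row "purchase_date" || pvTruthyGet row "has_purchase") = pvC 4 row := by
    rw [truthyGet_any row _ hpre, truthyGet_any row _ hpre, pvC, ← any_or]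
    simp only [pt4]
  have h3 : (["meeting_held", "attended", "showed_up", "attended_date"]).any (fun f => pvTruthyGet row f) = pvC 3 row := by
    simp only [List.any_cons, List.any_nil, Bool.or_false]
    rw [truthyGet_any row _ hpre, truthyGet_any row _ hpre, truthyGet_any row _ hpre,
        truthyGet_any row _ hpre, pvC, ← any_or, ← any_or, ← any_or]
    simp only [pt3, Bool.or_assoc]
  have h2 : (["meeting_booked", "booked", "booking_date", "appointment_date"]).any (fun f => pvTruthyGet row f) = pvC 2 row := by
    simp only [List.any_cons, List.any_nil, Bool.or_false]
    rw [truthyGet_any row _ hpre, truthyGet_any row _ hpre, truthyGet_any row _ hpre,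
        truthyGet_any row _ hpre, pvC, ← any_or, ← any_or, ← any_or]
    simp only [pt2, Bool.or_assoc]
  have h1 : (["qualified", "dm_qualified", "q1", "q2", "symptoms"]).any (fun f => pvTruthyGet row f) = pvC 1 row := by
    simp only [List.any_cons, List.any_nil, Bool.or_false]
    rw [truthyGet_any row _ hpre, truthyGet_any row _ hpre, truthyGet_any row _ hpre,
        truthyGet_any row _ hpre, truthyGet_any row _ hpre, pvC, ← any_or, ← any_or, ← any_or, ← any_or]
    simp only [pt1, Bool.or_assoc]
  rw [h4, h3, h2, h1]
  cases c4 : pvC 4 row <;> cases c3 : pvC 3 row <;> cases c2 : pvC 2 row <;>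
    cases c1 : pvC 1 row <;> simp [pvStages, PySem.List.pyGet?, PySem.List.pyIdx?]
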